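-- pv_equiv track=rewrite | github.com/vasudev-io/BSE-Fintech | helper.py | adjust_for_resets
-- ===== SOURCE A (Python) =====
-- def adjust_for_resets(data):
--
--     adjusted_data = []
--     last_non_reset_value = 0
--     total_offset = 0
--
--     for value in data:
--         if value < last_non_reset_value:
--             total_offset += last_non_reset_value
--         adjusted_value = value + total_offset
--         adjusted_data.append(adjusted_value)
--         last_non_reset_value = value
--
--     return adjusted_data
-- ===== SOURCE B (Python) =====
-- def adjust_for_resets(data):
--     # total of all reset contributions, then a right-to-left sweep that
--     # subtracts each contribution as it passes it, building output back-to-front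
--     total = sum(data[i - 1] for i in range(1, len(data)) if data[i] < data[i - 1])
--     out = []
--     for i in range(len(data) - 1, -1, -1):
--         out.append(data[i] + total)
--         if i >= 1 and data[i] < data[i - 1]:
--             total -= data[i - 1]
--     out.reverse()
--     return out
-- ===== Notes on version B (the rewrite author's own statement) =====
-- stated objective: alternative
-- what changed: Replaces A's forward stateful loop (running last value and growing offset) by a two-phase backward algorithm: compute the total of all reset contributions once, then sweep the list right-to-left emitting value+total and subtracting each contribution as it is passed, building the output back-to-front and reversing.
import Mathlib
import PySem

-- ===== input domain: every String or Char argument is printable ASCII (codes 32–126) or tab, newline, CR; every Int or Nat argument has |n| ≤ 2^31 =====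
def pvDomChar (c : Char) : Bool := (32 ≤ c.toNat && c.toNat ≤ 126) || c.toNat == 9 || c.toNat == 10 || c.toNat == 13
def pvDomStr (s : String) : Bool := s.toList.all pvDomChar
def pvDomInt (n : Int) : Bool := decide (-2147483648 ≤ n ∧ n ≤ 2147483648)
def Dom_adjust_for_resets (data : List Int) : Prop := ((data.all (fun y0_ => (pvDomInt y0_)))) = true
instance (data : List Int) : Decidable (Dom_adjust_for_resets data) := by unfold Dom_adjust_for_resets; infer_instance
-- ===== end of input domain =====

-- B replaces A's forward stateful loop by a backward sweep: total of all reset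
-- contributions, then right-to-left emit value+total subtracting contributions
-- passed, reversing at the end; objective: alternative decomposition.

-- ===== PORT A =====
-- A's loop: state (last_non_reset_value, total_offset), emitting value+offset at each step.
def adjustLoopA (data : List Int) (last off : Int) : List Int :=
  match data with
  | [] => []
  | v :: rest =>
      let off' := if v < last then off + last else off
      (v + off') :: adjustLoopA rest v off'

def adjust_for_resets (data : List Int) : List Int :=
  adjustLoopA data 0 0

-- ===== PORT B =====
-- sum(data[i-1] for i in range(1, len(data)) if data[i] < data[i-1]),
-- walking the adjacent pairs of the list
def resetSum (data : List Int) : Int :=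
  match data with
  | [] => 0
  | [_] => 0
  | a :: b :: r => (if b < a then a else 0) + resetSum (b :: r)

-- the backward for-loop: fuel k+1 processes index i = k; appends data[i]+total,
-- then subtracts data[i-1] when i >= 1 and data[i] < data[i-1]
def backLoop (data : List Int) : Nat → Int → List Int → List Int
  | 0, _, out => out
  | k + 1, total, out =>
      let out' := out ++ [data.getD k 0 + total]
      let total' := if 1 ≤ k ∧ data.getD k 0 < data.getD (k-1) 0
        then total - data.getD (k-1) 0 else total
      backLoop data k total' out'

def adjust_for_resets_alt (data : List Int) : List Int :=
  (backLoop data data.length (resetSum data) []).reverse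

-- ===== PRECONDITION & SPEC =====
def Spec_adjust_for_resets (data : List Int) (out : List Int) : Prop := out = adjust_for_resets_alt data
instance (data : List Int) (out : List Int) : Decidable (Spec_adjust_for_resets data out) := by unfold Spec_adjust_for_resets; infer_instance

-- ===== CLAIM (what is proved, stated in full; the proofs are below) =====
def Claim_equal_adjust_for_resets : Prop := ∀ (data : List Int), Dom_adjust_for_resets data → Spec_adjust_for_resets data (adjust_for_resets data)

-- ===== LEMMAS AND PROOFS =====

-- contribution list as seen by A starting from 'last'
def pvContrib (data : List Int) (last : Int) : List Int :=
  match data with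
  | [] => []
  | v :: rest => (if v < last then last else 0) :: pvContrib rest v

-- running sums with start s
def pvAccum (xs : List Int) (s : Int) : List Int :=
  match xs with
  | [] => []
  | x :: r => (s + x) :: pvAccum r (s + x)

-- the common reference value
def pvF (data : List Int) : List Int :=
  List.zipWith (· + ·) data (pvAccum (pvContrib data 0) 0)

theorem pvContrib_length (data : List Int) : ∀ last, (pvContrib data last).length = data.length := by
  induction data with
  | nil => intro last; rfl
  | cons v rest ih => intro last; simp [pvContrib, ih v]

theorem pvAccum_length (xs : List Int) : ∀ s, (pvAccum xs s).length = xs.length := by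
  induction xs with
  | nil => intro s; rfl
  | cons x r ih => intro s; simp [pvAccum, ih]

theorem pvF_length (data : List Int) : (pvF data).length = data.length := by
  simp [pvF, pvAccum_length, pvContrib_length]

-- ===== A-side: adjustLoopA computes zipWith data (accum contrib) =====
theorem adjustLoopA_eq (data : List Int) : ∀ last off : Int,
    adjustLoopA data last off = List.zipWith (· + ·) data (pvAccum (pvContrib data last) off) := by
  induction data with
  | nil => intro last off; simp [adjustLoopA, pvContrib, pvAccum]
  | cons v rest ih =>
      intro last off
      simp only [adjustLoopA, pvContrib, pvAccum, List.zipWith, ih v]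
      split_ifs with h <;> simp [add_comm]

-- ===== B-side lemmas =====

theorem resetSum_eq (rest : List Int) : ∀ prev : Int,
    (pvContrib rest prev).sum = resetSum (prev :: rest) := by
  induction rest with
  | nil => intro prev; simp [pvContrib, resetSum]
  | cons b r ih =>
      intro prev
      simp only [pvContrib, List.sum_cons, ih b, resetSum]

-- contrib entries in terms of data entries
theorem pvContrib_getD (data : List Int) : ∀ (j : Nat) (prev : Int), j + 1 < data.length →
    (pvContrib data prev).getD (j+1) 0
      = (if data.getD (j+1) 0 < data.getD j 0 then data.getD j 0 else 0) := by
  induction data with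
  | nil => intro j prev h; simp at h
  | cons v rest ih =>
      intro j prev h
      match j, rest with
      | 0, w :: r => simp [pvContrib]
      | j' + 1, rest =>
          have h' : j' + 1 < rest.length := by simpa using Nat.lt_of_succ_lt_succ h
          simpa [pvContrib] using ih j' v h'

-- accum entries are prefix sums
theorem pvAccum_getElem (xs : List Int) : ∀ (k : Nat) (s : Int) (h : k < xs.length),
    (pvAccum xs s)[k]'(by simpa [pvAccum_length] using h) = s + ((xs.take (k+1)).sum) := by
  induction xs with
  | nil => intro k s h; simp at h
  | cons x r ih =>
      intro k s h
      match k with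
      | 0 => simp [pvAccum]
      | k' + 1 =>
          have h' : k' < r.length := by simpa using Nat.lt_of_succ_lt_succ h
          have := ih k' (s + x) h'
          simp only [pvAccum, List.getElem_cons_succ, this, List.take_succ_cons, List.sum_cons]
          ring

theorem pvF_getElem (data : List Int) (k : Nat) (h : k < data.length) :
    (pvF data)[k]'(by simpa [pvF_length] using h)
      = data.getD k 0 + ((pvContrib data 0).take (k+1)).sum := by
  have hc : k < (pvContrib data 0).length := by simpa [pvContrib_length] using h
  have ha : k < (pvAccum (pvContrib data 0) 0).length := by simpa [pvAccum_length] using hc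
  simp only [pvF, List.getElem_zipWith]
  rw [pvAccum_getElem (pvContrib data 0) k 0 hc]
  simp [List.getD_eq_getElem?_getD, List.getElem?_eq_getElem h]

-- take k of contrib sums: step
theorem take_sum_succ (xs : List Int) (k : Nat) (h : k < xs.length) :
    ((xs.take (k+1)).sum) = (xs.take k).sum + xs.getD k 0 := by
  rw [List.sum_take_succ _ k h]
  simp [List.getD_eq_getElem?_getD, List.getElem?_eq_getElem h]

-- ===== the backward-loop invariant =====
theorem backLoop_inv (data : List Int) : ∀ (k : Nat), k ≤ data.length → ∀ out : List Int,
    backLoop data k (((pvContrib data 0).take k).sum) out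
      = out ++ ((pvF data).take k).reverse := by
  intro k
  induction k with
  | zero => intro _ out; simp [backLoop]
  | succ k ihk =>
      intro hk out
      have hklt : k < data.length := Nat.lt_of_succ_le hk
      have hcl : k < (pvContrib data 0).length := by simpa [pvContrib_length] using hklt
      have hfl : k < (pvF data).length := by simpa [pvF_length] using hklt
      -- the emitted element is (pvF data)[k]
      have hemit : data.getD k 0 + ((pvContrib data 0).take (k+1)).sum
          = (pvF data)[k]'hfl := by
        rw [pvF_getElem data k hklt]
      -- total' equals the sum of the first k contributions
      have htot : (if 1 ≤ k ∧ data.getD k 0 < data.getD (k-1) 0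
            then ((pvContrib data 0).take (k+1)).sum - data.getD (k-1) 0
            else ((pvContrib data 0).take (k+1)).sum)
          = ((pvContrib data 0).take k).sum := by
        cases k with
        | zero =>
            rw [if_neg (by simp)]
            cases data with
            | nil => simp at hklt
            | cons v rest => simp [pvContrib]
        | succ j =>
            simp only [Nat.add_sub_cancel]
            rw [take_sum_succ _ (j+1) hcl, pvContrib_getD data j 0 hklt]
            by_cases h : data.getD (j+1) 0 < data.getD j 0
            · rw [if_pos ⟨Nat.le_add_left 1 j, h⟩, if_pos h]; ring
            · rw [if_neg (fun hc => h hc.2), if_neg h]; ring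
      simp only [backLoop]
      simp only [htot]
      rw [ihk (Nat.le_of_lt hklt) _]
      rw [hemit]
      rw [List.take_add_one, List.getElem?_eq_getElem hfl]
      simp only [Option.toList_some, List.reverse_append, List.reverse_cons, List.reverse_nil,
        List.nil_append, List.cons_append, List.append_assoc]

-- ===== VERDICT (by name: the statement is the Claim_ definition above) =====
theorem adjust_for_resets_spec : Claim_equal_adjust_for_resets := by
  intro data _
  unfold Spec_adjust_for_resets adjust_for_resets adjust_for_resets_alt
  rw [adjustLoopA_eq data 0 0]
  have hr : resetSum data = ((pvContrib data 0).take data.length).sum := by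
    cases data with
    | nil => simp [resetSum, pvContrib]
    | cons v rest =>
        rw [List.take_of_length_le (by simp [pvContrib_length])]
        have : (pvContrib (v :: rest) 0).sum = resetSum (0 :: v :: rest) := by
          simpa using resetSum_eq (v :: rest) 0
        rw [this]
        simp [resetSum]
  rw [hr, backLoop_inv data data.length (le_refl _) []]
  rw [List.take_of_length_le (by simp [pvF_length])]
  simp [pvF]
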